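-- pv_equiv track=rewrite | github.com/Pilagors/Projet-Crypto | src/mapper.py | carte_vers_label
-- ===== SOURCE A (Python) =====
-- ORDRE = [
--     (range(1, 14), "Clubs"),
--     (range(14, 27), "Diamond"),
--     (range(27, 40), "Hearts"),
--     (range(40, 53), "Spades"),
-- ]
--
-- NOMMAGE = {
--     "Clubs" : "Trèfles",
--     "Diamond" : "Carreau",
--     "Hearts" : "Coeur",
--     "Spades" : "Pique",
-- }
--
-- FACES = {
--     1: "As",
--     11: "Valet",
--     12: "Dame",
--     13: "Roi"
-- }
--
-- def carte_vers_label(valeur):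
--     if valeur == 53:
--         return "Joker Noir"
--
--     if valeur == 54:
--         return "Joker Rouge"
--
--     for ordre, nom in ORDRE:
--         if valeur in ordre:
--             n = valeur - ordre.start + 1
--             name = FACES.get(n, str(n))
--             return f"{name} de {NOMMAGE[nom]}"
--
--     return f"Carte {valeur}"
-- ===== SOURCE B (Python) =====
-- NOMMAGE_ORDRE = ["Trèfles", "Carreau", "Coeur", "Pique"]
--
-- FACES = {
--     1: "As",
--     11: "Valet",
--     12: "Dame",
--     13: "Roi"
-- }
--
-- def carte_vers_label(valeur):
--     if valeur == 53:
--         return "Joker Noir"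
--     if valeur == 54:
--         return "Joker Rouge"
--     if not (1 <= valeur <= 52):
--         return f"Carte {valeur}"
--     n = (valeur - 1) % 13 + 1
--     return f"{FACES.get(n, str(n))} de {NOMMAGE_ORDRE[(valeur - 1) // 13]}"
-- ===== Notes on version B (the rewrite author's own statement) =====
-- stated objective: simpler
-- what changed: Replaces the linear scan over the four (range, suit) pairs with a closed-form arithmetic map: floor-division of the card number picks the French suit straight from a list and the remainder gives the face number, so the ORDRE loop and the NOMMAGE dict disappear.
import Mathlib
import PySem

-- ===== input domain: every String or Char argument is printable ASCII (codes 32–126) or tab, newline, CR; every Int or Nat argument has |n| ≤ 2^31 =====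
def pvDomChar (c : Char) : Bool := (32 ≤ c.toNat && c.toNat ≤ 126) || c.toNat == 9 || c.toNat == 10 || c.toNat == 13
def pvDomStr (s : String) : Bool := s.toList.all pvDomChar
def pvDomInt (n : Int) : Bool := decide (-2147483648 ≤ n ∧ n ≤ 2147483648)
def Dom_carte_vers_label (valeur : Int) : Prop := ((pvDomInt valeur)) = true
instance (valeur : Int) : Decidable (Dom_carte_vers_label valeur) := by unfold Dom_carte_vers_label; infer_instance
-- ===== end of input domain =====

-- B replaces A's linear scan over the four (range, suit) pairs by closed-form arithmetic
-- ((valeur-1)//13 and (valeur-1)%13+1) indexing a French suit list directly (objective: simpler).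

-- ===== PORT A =====
-- ORDRE: ranges represented by (start, stop); 'valeur in range(a,b)' = a ≤ valeur < b (step 1).
def pvOrdre : List ((Int × Int) × String) :=
  [((1, 14), "Clubs"), ((14, 27), "Diamond"), ((27, 40), "Hearts"), ((40, 53), "Spades")]

def pvNommage : PySem.Dict String String :=
  PySem.Dict.ofList [("Clubs", "Trèfles"), ("Diamond", "Carreau"), ("Hearts", "Coeur"), ("Spades", "Pique")]

def pvFaces : PySem.Dict Int String :=
  PySem.Dict.ofList [(1, "As"), (11, "Valet"), (12, "Dame"), (13, "Roi")]

-- the 'for ordre, nom in ORDRE' loop; NOMMAGE[nom] always hits a key here, ported as getD.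
def pvLoopA (valeur : Int) : List ((Int × Int) × String) → String
  | [] => "Carte " ++ PySem.Int.toStr valeur
  | ((a, b), nom) :: rest =>
    if a ≤ valeur ∧ valeur < b then
      let n := valeur - a + 1
      let name := PySem.Dict.getD pvFaces n (PySem.Int.toStr n)
      name ++ " de " ++ PySem.Dict.getD pvNommage nom ""
    else pvLoopA valeur rest

def carte_vers_label (valeur : Int) : String :=
  if valeur = 53 then "Joker Noir"
  else if valeur = 54 then "Joker Rouge"
  else pvLoopA valeur pvOrdre

-- ===== PORT B =====
def pvNommageOrdre : List String := ["Trèfles", "Carreau", "Coeur", "Pique"]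

-- Source B's FACES is the same literal table as A's; the port reuses pvFaces.
def carte_vers_label_alt (valeur : Int) : String :=
  if valeur = 53 then "Joker Noir"
  else if valeur = 54 then "Joker Rouge"
  else if ¬ (1 ≤ valeur ∧ valeur ≤ 52) then "Carte " ++ PySem.Int.toStr valeur
  else
    let n := PySem.Int.mod (valeur - 1) 13 + 1
    (PySem.Dict.getD pvFaces n (PySem.Int.toStr n)) ++ " de " ++
      ((PySem.List.pyGet? pvNommageOrdre (PySem.Int.floordiv (valeur - 1) 13)).getD "")

-- ===== PRECONDITION & SPEC =====
def Spec_carte_vers_label (valeur : Int) (out : String) : Prop := out = carte_vers_label_alt valeur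
instance (valeur : Int) (out : String) : Decidable (Spec_carte_vers_label valeur out) := by unfold Spec_carte_vers_label; infer_instance

-- ===== CLAIM (what is proved, stated in full; the proofs are below) =====
def Claim_equal_carte_vers_label : Prop := ∀ (valeur : Int), Dom_carte_vers_label valeur → Spec_carte_vers_label valeur (carte_vers_label valeur)

-- ===== LEMMAS AND PROOFS =====
theorem pv_out_of_range (valeur : Int) (h : ¬ (1 ≤ valeur ∧ valeur ≤ 54)) :
    carte_vers_label valeur = carte_vers_label_alt valeur := by
  unfold carte_vers_label carte_vers_label_alt
  rw [if_neg (show ¬ valeur = 53 by omega), if_neg (show ¬ valeur = 54 by omega),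
      if_neg (show ¬ valeur = 53 by omega), if_neg (show ¬ valeur = 54 by omega),
      if_pos (show ¬ (1 ≤ valeur ∧ valeur ≤ 52) by omega)]
  simp only [pvOrdre, pvLoopA]
  rw [if_neg (by omega), if_neg (by omega), if_neg (by omega), if_neg (by omega)]

-- ===== VERDICT (by name: the statement is the Claim_ definition above) =====
theorem carte_vers_label_spec : Claim_equal_carte_vers_label := by
  intro valeur _
  unfold Spec_carte_vers_label
  by_cases h : 1 ≤ valeur ∧ valeur ≤ 54
  · obtain ⟨h1, h2⟩ := h
    interval_cases valeur <;> decide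
  · exact pv_out_of_range valeur h
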